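-- pv_equiv track=rewrite | github.com/fsload/algorithm | 프로그래머스/모의고사.py | solution
-- ===== SOURCE A (Python) =====
-- def solution(answers):
--     answer = []
--     std1 = [1, 2, 3, 4, 5]
--     std2 = [2, 1, 2, 3, 2, 4, 2, 5]
--     std3 = [3, 3, 1, 1, 2, 2, 4, 4, 5, 5]
--     ans1 = 0
--     ans2 = 0
--     ans3 = 0
--     if len(answers) <= 10:
--         answers.append(0)
--         answers.append(0)
--         answers.append(0)
--         answers.append(0)
--         answers.append(0)
--         answers.append(0)
--         answers.append(0)
--         answers.append(0)
--         answers.append(0)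
--         answers.append(0)
--     for i in range(len(answers)):
--         if answers[i] == std1[i % 5]:
--             ans1 += 1
--         if answers[i] == std2[i % 8]:
--             ans2 += 1
--         if answers[i] == std3[i % 10]:
--             ans3 += 1
--     m = max(ans1, ans2, ans3)
--
--     if ans1 == m:
--         answer.append(1)
--     if ans2 == m:
--         answer.append(2)
--     if ans3 == m:
--         answer.append(3)
--
--     return answer
-- ===== SOURCE B (Python) =====
-- def solution(answers):
--     cnt = {}
--     for i, a in enumerate(answers):
--         key = (i % 40, a)
--         cnt[key] = cnt.get(key, 0) + 1
--     pats = [[1, 2, 3, 4, 5],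
--             [2, 1, 2, 3, 2, 4, 2, 5],
--             [3, 3, 1, 1, 2, 2, 4, 4, 5, 5]]
--     scores = [sum(cnt.get((r, p[r % len(p)]), 0) for r in range(40)) for p in pats]
--     m = max(scores)
--     return [k + 1 for k, s in enumerate(scores) if s == m]
-- ===== Notes on version B (the rewrite author's own statement) =====
-- stated objective: alternative
-- what changed: Replaces A's per-element comparison against the three cyclic patterns (one fused loop with three counters, after in-place zero-padding of short inputs) by a position-class histogram: one pass builds a dict counting pairs (i % 40, answers[i]) (40 = lcm of the pattern periods), then each pattern's score is obtained by 40 dict lookups; B does not mutate answers and does not pad (the padding zeros never match any pattern slot).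
import Mathlib
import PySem

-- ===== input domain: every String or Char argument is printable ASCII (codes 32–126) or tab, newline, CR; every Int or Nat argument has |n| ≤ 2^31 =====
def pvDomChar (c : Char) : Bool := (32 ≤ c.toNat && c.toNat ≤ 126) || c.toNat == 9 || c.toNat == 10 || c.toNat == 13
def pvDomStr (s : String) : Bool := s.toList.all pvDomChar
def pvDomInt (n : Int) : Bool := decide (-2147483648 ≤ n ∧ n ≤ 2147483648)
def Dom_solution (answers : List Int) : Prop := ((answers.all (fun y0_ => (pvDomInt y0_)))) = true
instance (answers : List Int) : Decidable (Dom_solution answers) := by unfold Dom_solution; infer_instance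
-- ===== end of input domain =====

-- B replaces A's element-by-element pattern comparison by a position-class histogram: one pass builds a
-- dict counting pairs (i % 40, answers[i]) (40 = lcm of the pattern periods), then each score is 40 dict
-- lookups; alternative decomposition, not claimed faster. NOTE: the Python A mutates `answers` in place
-- (appends ten zeros when len(answers) <= 10); B does not — the equivalence proved here is about the
-- RETURN value only.

-- ===== PORT A =====
def std1 : List Int := [1, 2, 3, 4, 5]
def std2 : List Int := [2, 1, 2, 3, 2, 4, 2, 5]
def std3 : List Int := [3, 3, 1, 1, 2, 2, 4, 4, 5, 5]

def solution (answers : List Int) : List Int :=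
  let answers := if answers.length ≤ 10 then answers ++ [0,0,0,0,0,0,0,0,0,0] else answers
  let t := (PySem.List.pyRange 0 (answers.length : Int) 1).foldl
    (fun (t : Int × Int × Int) i =>
      ((if PySem.List.pyGetD answers i 0 = PySem.List.pyGetD std1 (PySem.Int.mod i 5) 0 then t.1 + 1 else t.1),
       (if PySem.List.pyGetD answers i 0 = PySem.List.pyGetD std2 (PySem.Int.mod i 8) 0 then t.2.1 + 1 else t.2.1),
       (if PySem.List.pyGetD answers i 0 = PySem.List.pyGetD std3 (PySem.Int.mod i 10) 0 then t.2.2 + 1 else t.2.2)))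
    ((0 : Int), (0 : Int), (0 : Int))
  let m := max t.1 (max t.2.1 t.2.2)
  (if t.1 = m then [(1 : Int)] else []) ++
  (if t.2.1 = m then [(2 : Int)] else []) ++
  (if t.2.2 = m then [(3 : Int)] else [])

-- ===== PORT B =====
-- the three pattern literals of Source B (std1/std2/std3 are exactly those literals)
def pats : List (List Int) := [std1, std2, std3]

-- sum(cnt.get((r, p[r % len(p)]), 0) for r in range(40))
def scoreB (cnt : PySem.Dict (Int × Int) Int) (p : List Int) : Int :=
  ((PySem.List.pyRange 0 40 1).map
    (fun r => cnt.getD (r, PySem.List.pyGetD p (PySem.Int.mod r (p.length : Int)) 0) 0)).sum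

-- for i, a in enumerate(answers): key = (i % 40, a); cnt[key] = cnt.get(key, 0) + 1
def cntOf (answers : List Int) : PySem.Dict (Int × Int) Int :=
  (PySem.List.enumerate answers 0).foldl
    (fun d ia =>
      let key := (PySem.Int.mod ia.1 40, ia.2)
      d.insert key (d.getD key 0 + 1))
    PySem.Dict.empty

def solution_alt (answers : List Int) : List Int :=
  let cnt := cntOf answers
  let scores := pats.map (fun p => scoreB cnt p)
  let m := (PySem.List.max? scores (fun x => x)).getD 0   -- max(scores); scores has three elements, never none
  (PySem.List.enumerate scores 0).foldl
    (fun acc ks => if ks.2 = m then acc ++ [ks.1 + 1] else acc) []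

-- ===== PRECONDITION & SPEC =====
def Spec_solution (answers : List Int) (out : List Int) : Prop := out = solution_alt answers
instance (answers : List Int) (out : List Int) : Decidable (Spec_solution answers out) := by unfold Spec_solution; infer_instance

-- ===== CLAIM (what is proved, stated in full; the proofs are below) =====
def Claim_equal_solution : Prop := ∀ (answers : List Int), Dom_solution answers → Spec_solution answers (solution answers)

-- ===== LEMMAS AND PROOFS =====

-- the pattern slot an index addresses: p[i % len(p)]
def fpat (p : List Int) (i : Int) : Int :=
  PySem.List.pyGetD p (PySem.Int.mod i (p.length : Int)) 0

-- proof-side counting form shared by both reductions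
def score (p : List Int) (answers : List Int) : Int :=
  (PySem.List.enumerate answers 0).foldl
    (fun c ia => if ia.2 = fpat p ia.1 then c + 1 else c) 0

-- the padding values A appends never match a pattern slot: every slot is 1..5
theorem patget_ne_zero (p : List Int) (hp : p = std1 ∨ p = std2 ∨ p = std3) (i : Int) (_hi : 0 ≤ i) :
    fpat p i ≠ 0 := by
  unfold fpat
  rcases hp with h | h | h <;> subst h
  · rw [show ((std1.length : Int)) = 5 by decide]
    have h1 := PySem.Int.mod_nonneg i (b := (5 : Int)) (by norm_num)
    have h2 := PySem.Int.mod_lt i (b := (5 : Int)) (by norm_num)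
    set r := PySem.Int.mod i (5 : Int) with hr
    interval_cases r <;> decide
  · rw [show ((std2.length : Int)) = 8 by decide]
    have h1 := PySem.Int.mod_nonneg i (b := (8 : Int)) (by norm_num)
    have h2 := PySem.Int.mod_lt i (b := (8 : Int)) (by norm_num)
    set r := PySem.Int.mod i (8 : Int) with hr
    interval_cases r <;> decide
  · rw [show ((std3.length : Int)) = 10 by decide]
    have h1 := PySem.Int.mod_nonneg i (b := (10 : Int)) (by norm_num)
    have h2 := PySem.Int.mod_lt i (b := (10 : Int)) (by norm_num)
    set r := PySem.Int.mod i (10 : Int) with hr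
    interval_cases r <;> decide

-- a scan over an all-zero suffix leaves the running count unchanged
theorem score_pad (p : List Int) (hp : p = std1 ∨ p = std2 ∨ p = std3) (pad : List Int)
    (hz : ∀ x ∈ pad, x = 0) : ∀ (s : Int), 0 ≤ s → ∀ (c : Int),
    (PySem.List.enumerate pad s).foldl
      (fun c ia => if ia.2 = fpat p ia.1 then c + 1 else c) c = c := by
  induction pad with
  | nil => intro s _ c; simp [PySem.List.enumerate_nil]
  | cons a t ih =>
    intro s hs c
    rw [PySem.List.enumerate_cons]
    simp only [List.foldl_cons]
    have ha : a = 0 := hz a (by simp)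
    rw [if_neg (by rw [ha]; exact fun h => patget_ne_zero p hp s hs h.symm)]
    exact ih (fun x hx => hz x (by simp [hx])) (s + 1) (by omega) c

theorem score_pyRange (p : List Int) (xs : List Int) :
    score p xs = (PySem.List.pyRange 0 (xs.length : Int) 1).foldl
      (fun c j => if PySem.List.pyGetD xs j 0 = fpat p j then c + 1 else c) 0 := by
  unfold score
  rw [PySem.List.enumerate_eq_map_pyRange _ 0, List.foldl_map]
  rfl

theorem score1_eq (ys : List Int) :
    score std1 ys = (PySem.List.pyRange 0 (ys.length : Int) 1).foldl
      (fun c j => if PySem.List.pyGetD ys j 0 = PySem.List.pyGetD std1 (PySem.Int.mod j 5) 0 then c + 1 else c) 0 := by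
  rw [score_pyRange]; rfl

theorem score2_eq (ys : List Int) :
    score std2 ys = (PySem.List.pyRange 0 (ys.length : Int) 1).foldl
      (fun c j => if PySem.List.pyGetD ys j 0 = PySem.List.pyGetD std2 (PySem.Int.mod j 8) 0 then c + 1 else c) 0 := by
  rw [score_pyRange]; rfl

theorem score3_eq (ys : List Int) :
    score std3 ys = (PySem.List.pyRange 0 (ys.length : Int) 1).foldl
      (fun c j => if PySem.List.pyGetD ys j 0 = PySem.List.pyGetD std3 (PySem.Int.mod j 10) 0 then c + 1 else c) 0 := by
  rw [score_pyRange]; rfl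

-- a componentwise fold of a triple splits into three independent folds
theorem foldl_prod3 {α : Type} (l : List α) (f g h : Int → α → Int) :
    ∀ (a b c : Int),
    l.foldl (fun (t : Int × Int × Int) x => (f t.1 x, g t.2.1 x, h t.2.2 x)) (a, b, c) =
      (l.foldl f a, l.foldl g b, l.foldl h c) := by
  induction l with
  | nil => intro a b c; rfl
  | cons x t ih => intro a b c; simp only [List.foldl_cons]; exact ih _ _ _

-- A's combined loop computes exactly the three per-pattern scores
theorem foldA_eq (ys : List Int) :
    (PySem.List.pyRange 0 (ys.length : Int) 1).foldl
      (fun (t : Int × Int × Int) i =>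
        ((if PySem.List.pyGetD ys i 0 = PySem.List.pyGetD std1 (PySem.Int.mod i 5) 0 then t.1 + 1 else t.1),
         (if PySem.List.pyGetD ys i 0 = PySem.List.pyGetD std2 (PySem.Int.mod i 8) 0 then t.2.1 + 1 else t.2.1),
         (if PySem.List.pyGetD ys i 0 = PySem.List.pyGetD std3 (PySem.Int.mod i 10) 0 then t.2.2 + 1 else t.2.2)))
      ((0 : Int), (0 : Int), (0 : Int))
    = (score std1 ys, score std2 ys, score std3 ys) := by
  refine (foldl_prod3 (PySem.List.pyRange 0 (ys.length : Int) 1)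
      (fun c i => if PySem.List.pyGetD ys i 0 = PySem.List.pyGetD std1 (PySem.Int.mod i 5) 0 then c + 1 else c)
      (fun c i => if PySem.List.pyGetD ys i 0 = PySem.List.pyGetD std2 (PySem.Int.mod i 8) 0 then c + 1 else c)
      (fun c i => if PySem.List.pyGetD ys i 0 = PySem.List.pyGetD std3 (PySem.Int.mod i 10) 0 then c + 1 else c)
      0 0 0).trans ?_
  rw [score1_eq, score2_eq, score3_eq]

theorem score_padded (p : List Int) (hp : p = std1 ∨ p = std2 ∨ p = std3) (xs : List Int) :
    score p (xs ++ [0,0,0,0,0,0,0,0,0,0]) = score p xs := by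
  unfold score
  rw [PySem.List.enumerate_append, List.foldl_append]
  exact score_pad p hp _ (by decide) _ (by positivity) _

-- summing an indicator of a single value over a duplicate-free list
theorem sum_ite_single (l : List Int) (hl : l.Nodup) (r0 : Int) (g : Int → Int) :
    (l.map (fun r => if r = r0 then g r else 0)).sum = if r0 ∈ l then g r0 else 0 := by
  induction l with
  | nil => simp
  | cons a t ih =>
    have hnd := (List.nodup_cons.mp hl)
    by_cases h : a = r0
    · subst h
      have : (t.map (fun r => if r = a then g r else 0)).sum = 0 := by
        rw [ih hnd.2]; simp [hnd.1]
      simp [this]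
    · simp only [List.map_cons, List.sum_cons, if_neg h, ih hnd.2, List.mem_cons]
      have hne : r0 ≠ a := fun he => h he.symm
      simp [hne]

-- the pattern slot is 40-periodic (every pattern length divides 40)
theorem fpat_mod40 (p : List Int) (hp : p = std1 ∨ p = std2 ∨ p = std3) (i : Int) :
    fpat p (PySem.Int.mod i 40) = fpat p i := by
  unfold fpat
  have key : ∀ (L : Int), 0 < L → L ∣ 40 →
      PySem.Int.mod (PySem.Int.mod i 40) L = PySem.Int.mod i L := by
    intro L hL hdvd
    rw [PySem.Int.mod_eq_emod_of_pos hL, PySem.Int.mod_eq_emod_of_pos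
          (show (0:Int) < 40 by norm_num), PySem.Int.mod_eq_emod_of_pos hL,
        Int.emod_emod_of_dvd _ hdvd]
  rcases hp with h | h | h <;> subst h
  · rw [show ((std1.length : Int)) = 5 by decide, key 5 (by norm_num) (by norm_num)]
  · rw [show ((std2.length : Int)) = 8 by decide, key 8 (by norm_num) (by norm_num)]
  · rw [show ((std3.length : Int)) = 10 by decide, key 10 (by norm_num) (by norm_num)]

-- the counting form equals B's 40-bucket histogram sum
theorem score_eq_hist (p : List Int) (hp : p = std1 ∨ p = std2 ∨ p = std3) :
    ∀ (xs : List Int) (s : Int), 0 ≤ s → ∀ (c : Int),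
    (PySem.List.enumerate xs s).foldl
      (fun c ia => if ia.2 = fpat p ia.1 then c + 1 else c) c
    = c + ((PySem.List.pyRange 0 40 1).map
        (fun r => (((((PySem.List.enumerate xs s).map
            (fun ia => (PySem.Int.mod ia.1 40, ia.2))).count (r, fpat p r)) : Nat) : Int))).sum := by
  intro xs
  induction xs with
  | nil => intro s _ c; simp [PySem.List.enumerate_nil]
  | cons a t ih =>
    intro s hs c
    rw [PySem.List.enumerate_cons]
    simp only [List.foldl_cons, List.map_cons]
    have hcnt : ∀ r : Int,
        ((((PySem.Int.mod s 40, a) :: ((PySem.List.enumerate t (s+1)).map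
            (fun ia => (PySem.Int.mod ia.1 40, ia.2)))).count (r, fpat p r) : Nat) : Int)
        = ((((PySem.List.enumerate t (s+1)).map
            (fun ia => (PySem.Int.mod ia.1 40, ia.2))).count (r, fpat p r) : Nat) : Int)
          + (if r = PySem.Int.mod s 40 then (if fpat p r = a then (1:Int) else 0) else 0) := by
      intro r
      rw [List.count_cons]
      push_cast
      congr 1
      by_cases h1 : r = PySem.Int.mod s 40 <;> by_cases h2 : fpat p r = a <;>
        simp [Prod.ext_iff, h1, h2] <;> omega
    have hmap : (((PySem.List.pyRange 0 40 1).map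
        (fun r => ((((PySem.Int.mod s 40, a) :: ((PySem.List.enumerate t (s+1)).map
            (fun ia => (PySem.Int.mod ia.1 40, ia.2)))).count (r, fpat p r) : Nat) : Int)))).sum
        = ((PySem.List.pyRange 0 40 1).map
            (fun r => ((((PySem.List.enumerate t (s+1)).map
              (fun ia => (PySem.Int.mod ia.1 40, ia.2))).count (r, fpat p r) : Nat) : Int))).sum
          + (if fpat p (PySem.Int.mod s 40) = a then (1:Int) else 0) := by
      rw [List.map_congr_left (fun r _ => hcnt r), PySem.List.sum_map_add_int,
          sum_ite_single _ (PySem.List.nodup_pyRange_one 0 40) _ _,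
          if_pos (PySem.List.mem_pyRange_one.mpr
            ⟨PySem.Int.mod_nonneg s (by norm_num), PySem.Int.mod_lt s (by norm_num)⟩)]
    rw [hmap, fpat_mod40 p hp s, ih (s+1) (by omega)]
    by_cases hm : a = fpat p s
    · rw [if_pos hm, if_pos hm.symm]; ring
    · rw [if_neg hm, if_neg (fun h => hm h.symm)]; ring

-- B's dict is the counter of the keyed positions; its per-pattern sum is the score
theorem scoreB_eq (p : List Int) (hp : p = std1 ∨ p = std2 ∨ p = std3) (xs : List Int) :
    scoreB (cntOf xs) p = score p xs := by
  have hc : cntOf xs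
      = PySem.Dict.counter ((PySem.List.enumerate xs 0).map
          (fun ia => (PySem.Int.mod ia.1 40, ia.2))) := by
    rw [← PySem.Dict.foldl_insert_getD_add_one_eq_counter, List.foldl_map]; rfl
  rw [hc]
  unfold scoreB
  have : ∀ r ∈ PySem.List.pyRange 0 40 1,
      (PySem.Dict.counter ((PySem.List.enumerate xs 0).map
        (fun ia => (PySem.Int.mod ia.1 40, ia.2)))).getD
        (r, PySem.List.pyGetD p (PySem.Int.mod r (p.length : Int)) 0) 0
      = ((((PySem.List.enumerate xs 0).map
          (fun ia => (PySem.Int.mod ia.1 40, ia.2))).count (r, fpat p r) : Nat) : Int) := by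
    intro r _
    rw [PySem.Dict.getD_counter]
    rfl
  rw [List.map_congr_left this]
  have := score_eq_hist p hp xs 0 (by omega) 0
  unfold score
  omega

-- A's pick-the-winners tail equals B's max-of-table comprehension
theorem combine (s1 s2 s3 : Int) :
    ((if s1 = max s1 (max s2 s3) then [(1 : Int)] else []) ++
     (if s2 = max s1 (max s2 s3) then [(2 : Int)] else []) ++
     (if s3 = max s1 (max s2 s3) then [(3 : Int)] else []))
    = (PySem.List.enumerate [s1, s2, s3] 0).foldl
        (fun acc ks => if ks.2 = (PySem.List.max? [s1, s2, s3] (fun x => x)).getD 0 then acc ++ [ks.1 + 1] else acc) [] := by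
  rw [PySem.List.max?_id_cons]
  simp only [Option.getD_some, List.foldl_cons, List.foldl_nil,
             PySem.List.enumerate_cons, PySem.List.enumerate_nil]
  rw [max_assoc]
  split_ifs <;> simp

-- ===== VERDICT (by name: the statement is the Claim_ definition above) =====
theorem solution_spec : Claim_equal_solution := by
  intro answers _
  unfold Spec_solution
  show solution answers = solution_alt answers
  unfold solution solution_alt
  simp only [pats, List.map]
  simp only [scoreB_eq std1 (Or.inl rfl) answers, scoreB_eq std2 (Or.inr (Or.inl rfl)) answers,
      scoreB_eq std3 (Or.inr (Or.inr rfl)) answers]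
  by_cases hlen : answers.length ≤ 10
  · rw [if_pos hlen, foldA_eq,
        score_padded std1 (Or.inl rfl), score_padded std2 (Or.inr (Or.inl rfl)),
        score_padded std3 (Or.inr (Or.inr rfl))]
    exact combine _ _ _
  · rw [if_neg hlen, foldA_eq]
    exact combine _ _ _
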